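-- pv_equiv track=rewrite | github.com/kevin-atari/uav-mission-log-integrity | src/uav-ledger/services/logUploadSim.py | chunk_plan
-- ===== SOURCE A (Python) =====
-- def chunk_plan(total_lines: int, chunks: int):
--     """
--     Returns an array of cumulative indices for each upload:
--       e.g., total_lines=100, chunks=10 -> [10, 20, 30, ... , 100]
--     Ensures the last chunk includes any remainder.
--     """
--     base = total_lines // chunks
--     rem = total_lines % chunks
--     out = []
--     acc = 0
--     for i in range(chunks):
--         # Distribute the remainder into the earliest chunks
--         this = base + (1 if i < rem else 0)
--         acc += this
--         out.append(acc)
--     return out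
-- ===== SOURCE B (Python) =====
-- def chunk_plan(total_lines: int, chunks: int):
--     base, rem = divmod(total_lines, chunks)
--     return [base * (i + 1) + min(i + 1, rem) for i in range(chunks)]
-- ===== Notes on version B (the rewrite author's own statement) =====
-- stated objective: simpler
-- what changed: Replaces the running-accumulator loop by a closed form: each boundary is computed independently as base*(i+1)+min(i+1,rem), with no sequential state.
import Mathlib
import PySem

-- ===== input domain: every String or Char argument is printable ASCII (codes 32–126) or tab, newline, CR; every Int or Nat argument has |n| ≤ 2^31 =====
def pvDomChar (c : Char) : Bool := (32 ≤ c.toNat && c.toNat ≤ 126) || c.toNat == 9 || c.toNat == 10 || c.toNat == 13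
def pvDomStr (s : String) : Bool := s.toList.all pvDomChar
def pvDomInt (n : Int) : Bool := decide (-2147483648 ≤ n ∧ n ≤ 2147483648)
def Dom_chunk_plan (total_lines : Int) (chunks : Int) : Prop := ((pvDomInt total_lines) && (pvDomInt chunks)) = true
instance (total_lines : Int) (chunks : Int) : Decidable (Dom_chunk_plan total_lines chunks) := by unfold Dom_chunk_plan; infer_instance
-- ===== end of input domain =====

-- B replaces A's running accumulator by an independent closed form per index (objective: simpler).

-- ===== PORT A =====
def chunk_plan (total_lines : Int) (chunks : Int) : List Int :=
  let base := PySem.Int.floordiv total_lines chunks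
  let rem := PySem.Int.mod total_lines chunks
  let s := (PySem.List.pyRange 0 chunks 1).foldl
    (fun (s : List Int × Int) i =>
      let this := base + (if i < rem then 1 else 0)
      let acc := s.2 + this
      (s.1 ++ [acc], acc)) ([], 0)
  s.1

-- ===== PORT B =====
def chunk_plan_alt (total_lines : Int) (chunks : Int) : List Int :=
  let base := PySem.Int.floordiv total_lines chunks
  let rem := PySem.Int.mod total_lines chunks
  (PySem.List.pyRange 0 chunks 1).map (fun i => base * (i + 1) + min (i + 1) rem)

-- ===== PRECONDITION & SPEC =====
-- Pre_ excludes chunks = 0, on which Python A raises ZeroDivisionError.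
def Pre_chunk_plan (total_lines : Int) (chunks : Int) : Prop := chunks ≠ 0
instance (total_lines : Int) (chunks : Int) : Decidable (Pre_chunk_plan total_lines chunks) := by unfold Pre_chunk_plan; infer_instance
def pvWitness_chunk_plan : Int × Int := (100, 10)
def Spec_chunk_plan (total_lines : Int) (chunks : Int) (out : List Int) : Prop := out = chunk_plan_alt total_lines chunks
instance (total_lines : Int) (chunks : Int) (out : List Int) : Decidable (Spec_chunk_plan total_lines chunks out) := by unfold Spec_chunk_plan; infer_instance

-- ===== CLAIM (what is proved, stated in full; the proofs are below) =====
def Claim_equal_chunk_plan : Prop := ∀ (total_lines : Int) (chunks : Int), Dom_chunk_plan total_lines chunks → Pre_chunk_plan total_lines chunks → Spec_chunk_plan total_lines chunks (chunk_plan total_lines chunks)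

-- ===== LEMMAS AND PROOFS =====

-- Loop invariant: after n steps the accumulator is base*n + min n rem and the
-- output list is the per-index closed form, provided 0 ≤ rem.
theorem chunk_plan_loop (base rem : Int) (hrem : 0 ≤ rem) (n : Nat) :
    (PySem.List.pyRange 0 (n : Int) 1).foldl
      (fun (s : List Int × Int) i =>
        let this := base + (if i < rem then 1 else 0)
        let acc := s.2 + this
        (s.1 ++ [acc], acc)) ([], 0)
    = ((PySem.List.pyRange 0 (n : Int) 1).map (fun i => base * (i + 1) + min (i + 1) rem),
       base * (n : Int) + min (n : Int) rem) := by
  induction n with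
  | zero => simp; omega
  | succ n ih =>
      have h : PySem.List.pyRange 0 ((n : Int) + 1) 1
          = PySem.List.pyRange 0 (n : Int) 1 ++ [(n : Int)] :=
        PySem.List.pyRange_one_succ_right (by positivity)
      push_cast
      rw [h, List.foldl_append, List.map_append, ih]
      simp only [List.foldl_cons, List.foldl_nil, List.map_cons, List.map_nil]
      have key : base * (n : Int) + min (n : Int) rem + (base + if (n : Int) < rem then 1 else 0)
          = base * ((n : Int) + 1) + min ((n : Int) + 1) rem := by
        have hb : base * ((n : Int) + 1) = base * (n : Int) + base := by ring
        rw [hb]; split_ifs with hlt <;> omega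
      rw [key]

-- ===== VERDICT (by name: the statement is the Claim_ definition above) =====
theorem chunk_plan_spec : Claim_equal_chunk_plan := by
  intro t c _ hc
  unfold Spec_chunk_plan chunk_plan chunk_plan_alt
  rcases lt_trichotomy c 0 with hneg | h0 | hpos
  · have hr : PySem.List.pyRange 0 c 1 = [] := by
      rw [PySem.List.pyRange_one]
      simp
      omega
    simp [hr]
  · exact absurd h0 hc
  · have hcpos : 0 < c := hpos
    have hrem : 0 ≤ PySem.Int.mod t c := by
      rw [PySem.Int.mod_eq_emod_of_pos hcpos]
      exact Int.emod_nonneg t hc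
    have hn : c = ((c.toNat : Nat) : Int) := by omega
    rw [hn] at hrem ⊢
    simp only [chunk_plan_loop _ _ hrem]
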